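-- pv_equiv track=rewrite | github.com/BounouKha/CareLink | CareLink/account/services/lightweight_ids.py | determine_threat_level
-- ===== SOURCE A (Python) =====
-- def determine_threat_level(threats):
--     """Determine overall threat level"""
--     if not threats:
--         return 'LOW'
--
--     critical_types = {'token_reuse_different_ip', 'admin_access_attempt'}
--     high_types = {'sql_injection', 'command_injection', 'xss_attack'}
--     medium_types = {'path_traversal', 'weird_upload', 'rate_limit_exceeded'}
--
--     threat_types = {threat['type'] for threat in threats}
--
--     if any(t in critical_types for t in threat_types):
--         return 'CRITICAL'
--     elif any(t in high_types for t in threat_types):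
--         return 'HIGH'
--     elif any(t in medium_types for t in threat_types):
--         return 'MEDIUM'
--     else:
--         return 'LOW'
-- ===== SOURCE B (Python) =====
-- _SEVERITY = {
--     'token_reuse_different_ip': 3, 'admin_access_attempt': 3,
--     'sql_injection': 2, 'command_injection': 2, 'xss_attack': 2,
--     'path_traversal': 1, 'weird_upload': 1, 'rate_limit_exceeded': 1,
-- }
-- _LEVELS = ['LOW', 'MEDIUM', 'HIGH', 'CRITICAL']
--
-- def determine_threat_level(threats):
--     """Determine overall threat level"""
--     rank = 0
--     for threat in threats:
--         rank = max(rank, _SEVERITY.get(threat['type'], 0))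
--     return _LEVELS[rank]
-- ===== Notes on version B (the rewrite author's own statement) =====
-- stated objective: simpler
-- what changed: Replaces the dedup-set plus three ordered any-scans over three tier sets with a single max-severity fold over one severity-rank dict, indexing a level table by the maximum rank.
import Mathlib
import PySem

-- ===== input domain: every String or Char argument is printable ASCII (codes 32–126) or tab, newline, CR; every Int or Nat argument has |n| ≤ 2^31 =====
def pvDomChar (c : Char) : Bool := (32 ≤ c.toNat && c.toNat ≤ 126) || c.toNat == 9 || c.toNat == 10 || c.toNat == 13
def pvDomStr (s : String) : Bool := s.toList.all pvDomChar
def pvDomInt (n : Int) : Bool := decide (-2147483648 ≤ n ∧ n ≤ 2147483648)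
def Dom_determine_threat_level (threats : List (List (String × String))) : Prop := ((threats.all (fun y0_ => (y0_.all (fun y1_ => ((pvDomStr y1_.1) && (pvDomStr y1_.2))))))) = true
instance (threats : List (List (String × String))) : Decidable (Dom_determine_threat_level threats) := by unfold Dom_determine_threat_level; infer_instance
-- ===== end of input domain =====

-- B replaces A's dedup-set and three ordered tier-set scans with one max-severity
-- fold over a severity-rank dict, indexing a level table by the maximum rank (simpler).

-- ===== PORT A =====
-- threat['type'] (KeyError = none, excluded by Pre_); total form uses "" default
def pvTypeOf (t : List (String × String)) : String :=
  ((PySem.Dict.mk t).get? "type").getD ""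

def determine_threat_level (threats : List (List (String × String))) : String :=
  if threats = [] then "LOW"
  else
    let critical_types : PySem.Set String :=
      PySem.Set.ofList ["token_reuse_different_ip", "admin_access_attempt"]
    let high_types : PySem.Set String :=
      PySem.Set.ofList ["sql_injection", "command_injection", "xss_attack"]
    let medium_types : PySem.Set String :=
      PySem.Set.ofList ["path_traversal", "weird_upload", "rate_limit_exceeded"]
    let threat_types : PySem.Set String :=
      PySem.Set.ofList (threats.map pvTypeOf)
    if threat_types.any (fun t => PySem.Set.contains critical_types t) then "CRITICAL"
    else if threat_types.any (fun t => PySem.Set.contains high_types t) then "HIGH"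
    else if threat_types.any (fun t => PySem.Set.contains medium_types t) then "MEDIUM"
    else "LOW"

-- ===== PORT B =====
def pvSeverity : PySem.Dict String Int :=
  PySem.Dict.mk [("token_reuse_different_ip", 3), ("admin_access_attempt", 3),
                 ("sql_injection", 2), ("command_injection", 2), ("xss_attack", 2),
                 ("path_traversal", 1), ("weird_upload", 1), ("rate_limit_exceeded", 1)]

def pvLevels : List String := ["LOW", "MEDIUM", "HIGH", "CRITICAL"]

def determine_threat_level_alt (threats : List (List (String × String))) : String :=
  let rank : Int :=
    threats.foldl (fun r threat => max r (pvSeverity.getD (pvTypeOf threat) 0)) 0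
  PySem.List.pyGetD pvLevels rank ""

-- ===== PRECONDITION & SPEC =====
-- Pre_ excludes exactly the dicts without a 'type' key, where A (and B) raise KeyError.
def Pre_determine_threat_level (threats : List (List (String × String))) : Prop :=
  ∀ t ∈ threats, ((PySem.Dict.mk t).get? "type").isSome = true
instance (threats : List (List (String × String))) : Decidable (Pre_determine_threat_level threats) := by unfold Pre_determine_threat_level; infer_instance

def pvWitness_determine_threat_level : (List (List (String × String))) :=
  [[("type", "sql_injection")], [("type", "other")]]

def Spec_determine_threat_level (threats : List (List (String × String))) (out : String) : Prop := out = determine_threat_level_alt threats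
instance (threats : List (List (String × String))) (out : String) : Decidable (Spec_determine_threat_level threats out) := by unfold Spec_determine_threat_level; infer_instance

-- ===== CLAIM (what is proved, stated in full; the proofs are below) =====
def Claim_equal_determine_threat_level : Prop := ∀ (threats : List (List (String × String))), Dom_determine_threat_level threats → Pre_determine_threat_level threats → Spec_determine_threat_level threats (determine_threat_level threats)

-- ===== LEMMAS AND PROOFS =====

def pvIsCrit (t : String) : Bool := ["token_reuse_different_ip", "admin_access_attempt"].contains t
def pvIsHigh (t : String) : Bool := ["sql_injection", "command_injection", "xss_attack"].contains t
def pvIsMed (t : String) : Bool := ["path_traversal", "weird_upload", "rate_limit_exceeded"].contains t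

theorem pvSev_eq (t : String) :
    pvSeverity.getD t 0 =
      (if pvIsCrit t then 3 else if pvIsHigh t then 2 else if pvIsMed t then 1 else 0) := by
  by_cases h1 : t = "token_reuse_different_ip" <;>
  by_cases h2 : t = "admin_access_attempt" <;>
  by_cases h3 : t = "sql_injection" <;>
  by_cases h4 : t = "command_injection" <;>
  by_cases h5 : t = "xss_attack" <;>
  by_cases h6 : t = "path_traversal" <;>
  by_cases h7 : t = "weird_upload" <;>
  by_cases h8 : t = "rate_limit_exceeded" <;>
  first
    | (subst t; decide)
    | simp [pvSeverity, PySem.Dict.getD, pvIsCrit, pvIsHigh, pvIsMed,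
            PySem.Dict.get?, Ne.symm h1, Ne.symm h2, Ne.symm h3, Ne.symm h4, Ne.symm h5,
            Ne.symm h6, Ne.symm h7, Ne.symm h8, h1, h2, h3, h4, h5, h6, h7, h8]

def pvMaxRank (l : List String) : Int :=
  l.foldl (fun r t => max r (pvSeverity.getD t 0)) 0

theorem pvSev_nonneg (t : String) : 0 ≤ pvSeverity.getD t 0 := by
  rw [pvSev_eq]; split_ifs <;> omega

theorem pvMaxRank_acc (l : List String) :
    ∀ a : Int, 0 ≤ a → l.foldl (fun r t => max r (pvSeverity.getD t 0)) a = max a (pvMaxRank l) := by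
  induction l with
  | nil => intro a ha; simp [pvMaxRank]; omega
  | cons t l ih =>
      intro a ha
      have hs := pvSev_nonneg t
      simp only [List.foldl_cons]
      rw [ih _ (by omega)]
      have h2 : pvMaxRank (t :: l) = max (max (0 : Int) (pvSeverity.getD t 0)) (pvMaxRank l) := by
        simp only [pvMaxRank, List.foldl_cons]
        exact ih _ (by omega)
      rw [h2, max_eq_right hs]
      rw [← max_assoc]

theorem pvMaxRank_char (l : List String) :
    pvMaxRank l =
      (if l.any pvIsCrit then 3 else if l.any pvIsHigh then 2 else if l.any pvIsMed then 1 else 0) := by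
  induction l with
  | nil => simp [pvMaxRank]
  | cons t l ih =>
      have hs := pvSev_nonneg t
      have h : pvMaxRank (t :: l) = max (pvSeverity.getD t 0) (pvMaxRank l) := by
        simp only [pvMaxRank, List.foldl_cons]
        rw [pvMaxRank_acc l _ (by omega), max_eq_right hs]
        rfl
      rw [h, ih, pvSev_eq]
      simp only [List.any_cons]
      by_cases c1 : pvIsCrit t <;> by_cases c2 : pvIsHigh t <;> by_cases c3 : pvIsMed t <;>
        simp_all <;> split_ifs <;> simp_all

theorem pvSet_any_eq (l : List String) (p : String → Bool) :
    (PySem.Set.ofList l).any p = l.any p := by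
  rw [Bool.eq_iff_iff]
  simp only [List.any_eq_true, PySem.Set.mem_ofList]

theorem pvContains_crit (t : String) :
    PySem.Set.contains (PySem.Set.ofList ["token_reuse_different_ip", "admin_access_attempt"]) t = pvIsCrit t := by
  rfl

theorem pvContains_high (t : String) :
    PySem.Set.contains (PySem.Set.ofList ["sql_injection", "command_injection", "xss_attack"]) t = pvIsHigh t := by
  rfl

theorem pvContains_med (t : String) :
    PySem.Set.contains (PySem.Set.ofList ["path_traversal", "weird_upload", "rate_limit_exceeded"]) t = pvIsMed t := by
  rfl

-- ===== VERDICT (by name: the statement is the Claim_ definition above) =====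
theorem determine_threat_level_spec : Claim_equal_determine_threat_level := by
  intro threats _ _
  unfold Spec_determine_threat_level determine_threat_level determine_threat_level_alt
  rw [List.foldl_map.symm.trans (by rfl : ((threats.map pvTypeOf).foldl (fun r t => max r (pvSeverity.getD t 0)) 0) = pvMaxRank (threats.map pvTypeOf))]
  set l := threats.map pvTypeOf with hl
  rw [pvMaxRank_char]
  simp only [pvSet_any_eq]
  simp only [pvContains_crit, pvContains_high, pvContains_med]
  by_cases hemp : threats = []
  · subst hemp; simp only [hl]; decide
  · simp only [if_neg hemp]
    split_ifs <;> decide
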